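-- pv_equiv track=rewrite | github.com/diegocabello/smma | smma/archive/html_parser_third.py | custom_prettify_html
-- ===== SOURCE A (Python) =====
-- def custom_prettify_html(html_str, indent_size=4):
--     lines = html_str.split('\n')
--     custom_indented_lines = []
--     for line in lines:
--         stripped_line = line.lstrip()
--         leading_spaces = len(line) - len(stripped_line)
--         indented_line = ' ' * (leading_spaces * indent_size) + stripped_line
--         custom_indented_lines.append(indented_line)
--     return '\n'.join(custom_indented_lines)
-- ===== SOURCE B (Python) =====
-- def custom_prettify_html(html_str, indent_size=4):
--     # Single character-level pass over the whole string: no split('\n'),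
--     # no per-line lstrip, no join of a list of lines.
--     out = []
--     i, n = 0, len(html_str)
--     while True:
--         j = i
--         while j < n and html_str[j].isspace() and html_str[j] != '\n':
--             j += 1
--         k = j
--         while k < n and html_str[k] != '\n':
--             k += 1
--         out.append(' ' * ((j - i) * indent_size))
--         out.append(html_str[j:k])
--         if k == n:
--             break
--         out.append('\n')
--         i = k + 1
--     return ''.join(out)
-- ===== Notes on version B (the rewrite author's own statement) =====
-- stated objective: alternative
-- what changed: Replaces the split-into-lines / per-line lstrip / accumulator-list / join pipeline with a single index-based pass over the whole string that scans each line's leading whitespace run and its body in place and emits the pieces directly.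
import Mathlib
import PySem

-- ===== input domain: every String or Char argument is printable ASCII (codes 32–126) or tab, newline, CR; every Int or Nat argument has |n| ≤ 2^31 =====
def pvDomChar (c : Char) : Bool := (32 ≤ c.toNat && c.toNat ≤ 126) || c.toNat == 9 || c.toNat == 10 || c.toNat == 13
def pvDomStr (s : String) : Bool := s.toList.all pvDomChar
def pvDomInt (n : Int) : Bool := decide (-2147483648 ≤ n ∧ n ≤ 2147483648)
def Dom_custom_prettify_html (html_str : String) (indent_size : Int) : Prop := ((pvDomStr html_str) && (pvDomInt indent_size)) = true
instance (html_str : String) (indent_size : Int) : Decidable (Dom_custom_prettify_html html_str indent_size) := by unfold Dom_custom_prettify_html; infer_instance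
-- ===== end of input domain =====

-- B is an alternative single-pass implementation (no split/lstrip/join); equal return value proved.
-- ===== PORT A =====
-- the loop body of A: lstrip, count stripped chars, re-indent (exact over List Char)
def pvA_line (indent_size : Int) (line : List Char) : List Char :=
  let stripped_line := PySem.Chars.lstrip line
  let leading_spaces : Int := (line.length : Int) - (stripped_line.length : Int)
  PySem.List.pyRepeat [' '] (leading_spaces * indent_size) ++ stripped_line

def custom_prettify_html (html_str : String) (indent_size : Int) : String :=
  let lines := PySem.Chars.splitOn html_str.toList ['\n']
  let custom_indented_lines := lines.foldl (fun acc line => acc ++ [pvA_line indent_size line]) []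
  String.mk (PySem.Chars.join ['\n'] custom_indented_lines)

-- ===== PORT B =====
-- the whitespace test of B's inner scan: isspace and not a newline
def pvWsNotNl (c : Char) : Bool := PySem.Chars.isspace c && !(c == '\n')

-- one iteration of B's outer while-loop: scan the leading whitespace run, then the body
-- up to the next newline, emit the pieces, and continue after the newline
def pvB_go (indent_size : Int) (s : List Char) : List Char :=
  match h : (s.dropWhile pvWsNotNl).dropWhile (fun c => !(c == '\n')) with
  | [] =>
      List.replicate (((s.takeWhile pvWsNotNl).length : Int) * indent_size).toNat ' '
        ++ (s.dropWhile pvWsNotNl).takeWhile (fun c => !(c == '\n'))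
  | _ :: tail =>
      (List.replicate (((s.takeWhile pvWsNotNl).length : Int) * indent_size).toNat ' '
        ++ (s.dropWhile pvWsNotNl).takeWhile (fun c => !(c == '\n')))
        ++ '\n' :: pvB_go indent_size tail
termination_by s.length
decreasing_by
  have h1 : ((s.dropWhile pvWsNotNl).dropWhile (fun c => !(c == '\n'))).length ≤ s.length :=
    le_trans (List.length_dropWhile_le _ _) (List.length_dropWhile_le _ _)
  rw [h] at h1
  simpa using Nat.lt_of_lt_of_le (Nat.lt_succ_self _) h1

def custom_prettify_html_alt (html_str : String) (indent_size : Int) : String :=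
  String.mk (pvB_go indent_size html_str.toList)

-- ===== PRECONDITION & SPEC =====
def Spec_custom_prettify_html (html_str : String) (indent_size : Int) (out : String) : Prop := out = custom_prettify_html_alt html_str indent_size
instance (html_str : String) (indent_size : Int) (out : String) : Decidable (Spec_custom_prettify_html html_str indent_size out) := by unfold Spec_custom_prettify_html; infer_instance

-- ===== CLAIM (what is proved, stated in full; the proofs are below) =====
def Claim_equal_custom_prettify_html : Prop := ∀ (html_str : String) (indent_size : Int), Dom_custom_prettify_html html_str indent_size → Spec_custom_prettify_html html_str indent_size (custom_prettify_html html_str indent_size)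

-- ===== LEMMAS AND PROOFS =====

-- reference single-character splitter (accumulating the current piece in order)
def pvSplit (c : Char) (pre : List Char) : List Char → List (List Char)
  | [] => [pre]
  | x :: rest => if x = c then pre :: pvSplit c [] rest else pvSplit c (pre ++ [x]) rest

theorem pvSplit_ne_nil (c : Char) (pre l : List Char) : pvSplit c pre l ≠ [] := by
  induction l generalizing pre with
  | nil => simp [pvSplit]
  | cons x rest ih => by_cases hx : x = c <;> simp [pvSplit, hx, ih]

-- the fuelled splitter of PySem computes pvSplit
theorem pvGo_eq (c : Char) (fuel : Nat) : ∀ (l cur : List Char) (acc : List (List Char)),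
    l.length < fuel →
    PySem.Chars.splitOn.go [c] fuel l cur acc = acc.reverse ++ pvSplit c cur.reverse l := by
  induction fuel with
  | zero => intro l cur acc h; omega
  | succ fuel ih =>
    intro l cur acc h
    cases l with
    | nil => rw [PySem.Chars.splitOn.go.eq_def]; simp [pvSplit]
    | cons x rest =>
      rw [PySem.Chars.splitOn.go.eq_def]
      simp only [List.isPrefixOf_cons₂, List.isPrefixOf_nil_left, Bool.and_true, List.length_cons,
        List.drop_succ_cons, List.drop_zero]
      by_cases hx : x = c
      · have hxc : (c == x) = true := by simp [hx]
        rw [if_pos hxc]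
        simp only [List.length_cons, List.length_nil, List.drop_succ_cons, List.drop_zero]
        rw [ih rest [] (cur.reverse :: acc) (by simp at h; omega)]
        simp [pvSplit, hx]
      · have hxc : ¬ ((c == x) = true) := by simp; exact fun h2 => hx h2.symm
        rw [if_neg hxc]
        rw [ih rest (x :: cur) acc (by simp at h; omega)]
        simp [pvSplit, hx]

theorem pvSplitOn_eq (c : Char) (s : List Char) :
    PySem.Chars.splitOn s [c] = pvSplit c [] s := by
  unfold PySem.Chars.splitOn
  rw [pvGo_eq c (s.length + 1) s [] [] (by omega)]
  simp

-- A's append-accumulator loop is a map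
theorem pvFoldl_append_map (f : List Char → List Char) (l : List (List Char)) :
    ∀ acc, l.foldl (fun a x => a ++ [f x]) acc = acc ++ l.map f := by
  induction l with
  | nil => simp
  | cons x rest ih => intro acc; simp [List.foldl_cons, ih]

theorem pvSplit_no_sep (c : Char) (l : List Char) (h : ∀ x ∈ l, x ≠ c) :
    ∀ pre, pvSplit c pre l = [pre ++ l] := by
  induction l with
  | nil => simp [pvSplit]
  | cons x rest ih =>
    intro pre
    have hx : x ≠ c := h x (by simp)
    simp only [pvSplit, if_neg hx]
    rw [ih (fun y hy => h y (by simp [hy]))]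
    simp

theorem pvSplit_sep (c : Char) (l t : List Char) (h : ∀ x ∈ l, x ≠ c) :
    ∀ pre, pvSplit c pre (l ++ c :: t) = (pre ++ l) :: pvSplit c [] t := by
  induction l with
  | nil => simp [pvSplit]
  | cons x rest ih =>
    intro pre
    have hx : x ≠ c := h x (by simp)
    simp only [List.cons_append, pvSplit, if_neg hx]
    rw [ih (fun y hy => h y (by simp [hy]))]
    simp

-- A's per-line transform on a line of the form (whitespace run ++ body)
theorem pvA_line_decomp (i : Int) (ws body : List Char)
    (hws : ∀ x ∈ ws, PySem.Chars.isspace x = true)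
    (hb : PySem.Chars.lstrip body = body) :
    pvA_line i (ws ++ body) = List.replicate (((ws.length : Int) * i)).toNat ' ' ++ body := by
  have hstrip : PySem.Chars.lstrip (ws ++ body) = body := by
    unfold PySem.Chars.lstrip at *
    rw [List.dropWhile_append]
    split
    · exact hb
    · next h2 =>
      exfalso
      have h3 : ws.dropWhile PySem.Chars.isspace ≠ [] := by
        intro hnil; rw [hnil] at h2; simp at h2
      have := List.head_dropWhile_not PySem.Chars.isspace h3
      have hmem : (ws.dropWhile PySem.Chars.isspace).head h3 ∈ ws :=
        (List.dropWhile_sublist _).mem (List.head_mem h3)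
      simp [hws _ hmem] at this
  unfold pvA_line
  dsimp only
  rw [hstrip, PySem.List.pyRepeat_singleton]
  have harg : (((ws ++ body).length : Int) - (body.length : Int)) = (ws.length : Int) := by
    push_cast [List.length_append]; ring
  rw [harg]

-- a list whose head is not whitespace (or which is empty) is lstrip-fixed
theorem pvLstrip_fixed (body : List Char)
    (hb : ∀ y, body.head? = some y → PySem.Chars.isspace y = false) :
    PySem.Chars.lstrip body = body := by
  cases body with
  | nil => rfl
  | cons b rest =>
    have := hb b (by simp)
    simp [PySem.Chars.lstrip, this]

-- the first character of B's line body is never Python whitespace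
theorem pvBodyHead (r : List Char) (hh : ∀ h : r ≠ [], pvWsNotNl (r.head h) = false)
    (y : Char) (hy : (r.takeWhile (fun c => !(c == '\n'))).head? = some y) :
    PySem.Chars.isspace y = false := by
  cases r with
  | nil => simp at hy
  | cons x rest =>
    by_cases hq : (!(x == '\n')) = true
    · rw [List.takeWhile_cons, if_pos hq] at hy
      simp at hy
      subst hy
      have hx := hh (by simp)
      simp only [List.head_cons] at hx
      simp at hq
      simp [pvWsNotNl, hq] at hx
      simpa [hq] using hx
    · rw [List.takeWhile_cons, if_neg hq] at hy
      simp at hy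

-- the main correspondence: B's single pass equals A's split/transform/join pipeline
theorem pvB_eq_pipeline (i : Int) : ∀ (n : Nat) (s : List Char), s.length ≤ n →
    pvB_go i s = PySem.Chars.join ['\n'] ((pvSplit '\n' [] s).map (pvA_line i)) := by
  intro n
  induction n with
  | zero =>
    intro s hs
    have : s = [] := List.eq_nil_of_length_eq_zero (Nat.le_zero.mp hs)
    subst this
    rw [pvB_go]
    simp [pvSplit, PySem.Chars.join_singleton, pvA_line, PySem.Chars.lstrip,
      PySem.List.pyRepeat_singleton]
  | succ n ih =>
    intro s hs
    have hsplit1 : s.takeWhile pvWsNotNl ++ s.dropWhile pvWsNotNl = s :=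
      List.takeWhile_append_dropWhile
    have hsplit2 : (s.dropWhile pvWsNotNl).takeWhile (fun c => !(c == '\n'))
        ++ (s.dropWhile pvWsNotNl).dropWhile (fun c => !(c == '\n')) = s.dropWhile pvWsNotNl :=
      List.takeWhile_append_dropWhile
    have hws_sp : ∀ x ∈ s.takeWhile pvWsNotNl, PySem.Chars.isspace x = true := by
      intro x hx
      have := List.mem_takeWhile_imp hx
      simp [pvWsNotNl] at this
      exact this.1
    have hws_nl : ∀ x ∈ s.takeWhile pvWsNotNl, x ≠ '\n' := by
      intro x hx
      have := List.mem_takeWhile_imp hx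
      simp [pvWsNotNl] at this
      exact this.2
    have hbody_nl : ∀ x ∈ (s.dropWhile pvWsNotNl).takeWhile (fun c => !(c == '\n')), x ≠ '\n' := by
      intro x hx
      have := List.mem_takeWhile_imp hx
      simpa using this
    have hall_nl : ∀ x ∈ s.takeWhile pvWsNotNl ++ (s.dropWhile pvWsNotNl).takeWhile (fun c => !(c == '\n')), x ≠ '\n' := by
      intro x hx
      rcases List.mem_append.mp hx with h1 | h1
      · exact hws_nl x h1
      · exact hbody_nl x h1
    have hb_fixed : PySem.Chars.lstrip ((s.dropWhile pvWsNotNl).takeWhile (fun c => !(c == '\n'))) = (s.dropWhile pvWsNotNl).takeWhile (fun c => !(c == '\n')) := by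
      apply pvLstrip_fixed
      intro y hy
      exact pvBodyHead _ (fun h => List.head_dropWhile_not pvWsNotNl h) y hy
    rw [pvB_go.eq_def]
    split
    · next heq =>
      have hs_eq : s = s.takeWhile pvWsNotNl ++ (s.dropWhile pvWsNotNl).takeWhile (fun c => !(c == '\n')) := by
        conv_lhs => rw [← hsplit1, ← hsplit2]
        rw [heq]
        simp
      rw [show pvSplit '\n' [] s = [s.takeWhile pvWsNotNl ++ (s.dropWhile pvWsNotNl).takeWhile (fun c => !(c == '\n'))] from by
        conv_lhs => rw [hs_eq]
        exact (pvSplit_no_sep '\n' _ hall_nl []).trans (by simp)]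
      rw [List.map_singleton, PySem.Chars.join_singleton]
      rw [pvA_line_decomp i _ _ hws_sp hb_fixed]
    · next hd tail heq =>
      have hrne : (s.dropWhile pvWsNotNl).dropWhile (fun c => !(c == '\n')) ≠ [] := by simp [heq]
      have hhd := List.head_dropWhile_not (fun c => !(c == '\n')) hrne
      have hhd_eq : hd = '\n' := by
        have : ((s.dropWhile pvWsNotNl).dropWhile (fun c => !(c == '\n'))).head hrne = hd := by
          simp [heq]
        rw [this] at hhd
        simpa using hhd
      subst hhd_eq
      have hs_eq : s = (s.takeWhile pvWsNotNl ++ (s.dropWhile pvWsNotNl).takeWhile (fun c => !(c == '\n'))) ++ '\n' :: tail := by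
        conv_lhs => rw [← hsplit1, ← hsplit2]
        rw [heq]
        simp
      have hlen : tail.length ≤ n := by
        have := congrArg List.length hs_eq
        simp [List.length_append] at this
        omega
      rw [show pvSplit '\n' [] s = (s.takeWhile pvWsNotNl ++ (s.dropWhile pvWsNotNl).takeWhile (fun c => !(c == '\n'))) :: pvSplit '\n' [] tail from by
        conv_lhs => rw [hs_eq]
        exact pvSplit_sep '\n' _ tail hall_nl []]
      obtain ⟨a, as, has⟩ : ∃ a as, pvSplit '\n' [] tail = a :: as := by
        cases hps : pvSplit '\n' [] tail with
        | nil => exact absurd hps (pvSplit_ne_nil _ _ _)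
        | cons a as => exact ⟨a, as, rfl⟩
      rw [has, List.map_cons, List.map_cons, PySem.Chars.join_cons_cons]
      rw [pvA_line_decomp i _ _ hws_sp hb_fixed]
      rw [ih tail hlen, has, List.map_cons]
      simp

-- ===== VERDICT (by name: the statement is the Claim_ definition above) =====
theorem custom_prettify_html_spec : Claim_equal_custom_prettify_html := by
  intro html_str indent_size _
  unfold Spec_custom_prettify_html custom_prettify_html custom_prettify_html_alt
  dsimp only
  rw [pvSplitOn_eq, pvFoldl_append_map, pvB_eq_pipeline indent_size html_str.toList.length _ le_rfl]
  simp
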